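-- pv_equiv track=rewrite | github.com/knslee07/icml2026 | src/inference.py | find_firm_in_text
-- ===== SOURCE A (Python) =====
-- def find_firm_in_text(firm: str, text: str) -> str:
--     """Validate that a consultant name appears in the source text.
--
--     Uses word-by-word sequence matching with gap tolerance.
--     Returns the matched name from text, or None if not found.
--     """
--     firm_lower = firm.lower()
--
--     # Tokenize firm name preserving & and .
--     firm_words = []
--     current_word = ""
--     for char in firm_lower:
--         if char.isalnum() or char in ['&', '.']:
--             current_word += char
--         else:
--             if current_word:
--                 firm_words.append(current_word)
--                 current_word = ""
--     if current_word:
--         firm_words.append(current_word)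
--
--     # Filter short words
--     firm_words = [w for w in firm_words if len(w) > 1 or (len(w) == 1 and w.isalpha()) or '.' in w]
--
--     if not firm_words:
--         return None
--
--     # Find all positions of each word in text
--     text_lower = text.lower()
--     word_positions = []
--     for word in firm_words:
--         positions = []
--         start = 0
--         while True:
--             pos = text_lower.find(word, start)
--             if pos == -1:
--                 break
--             positions.append(pos)
--             start = pos + 1
--         if not positions:
--             return None
--         word_positions.append(positions)
--
--     if not word_positions or not word_positions[0]:
--         return None
--
--     # Find words appearing in sequence with max gap
--     max_gap = 5  # Max words between consecutive firm words
--
--     for first_pos in word_positions[0]: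
--         current_pos = first_pos
--         found_sequence = [current_pos]
--
--         success = True
--         for next_word_positions in word_positions[1:]:
--             valid_next_pos = None
--             for pos in next_word_positions:
--                 if 0 < pos - current_pos < max_gap * 15:
--                     valid_next_pos = pos
--                     break
--
--             if valid_next_pos is None:
--                 success = False
--                 break
--
--             found_sequence.append(valid_next_pos)
--             current_pos = valid_next_pos
--
--         if not success:
--             continue
--
--         if len(found_sequence) == len(firm_words):
--             start_pos = found_sequence[0]
--             end_pos = found_sequence[-1] + len(firm_words[-1])
--
--             # Expand boundaries
--             while start_pos > 0 and (text[start_pos-1].isalnum() or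
--                                      text[start_pos-1] in '&., '):
--                 start_pos -= 1
--             while end_pos < len(text) and (text[end_pos].isalnum() or
--                                            text[end_pos] in '&., '):
--                 end_pos += 1
--
--             company_name = text[start_pos:end_pos].strip()
--             if all(word in company_name.lower() for word in firm_words):
--                 return company_name.strip(' ,():;')
--
--     return None
-- ===== SOURCE B (Python) =====
-- def find_firm_in_text(firm: str, text: str) -> str:
--     """Alternative implementation: mask+split tokenizer, binary-search (bisect)
--     step to find the next word position, takewhile-count boundary expansion."""
--     firm_lower = firm.lower()
--
--     # Tokenize by masking every non-word char to a space, then splitting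
--     masked = ''.join(c if (c.isalnum() or c in '&.') else ' ' for c in firm_lower)
--     firm_words = [w for w in masked.split()
--                   if len(w) > 1 or (len(w) == 1 and w.isalpha()) or '.' in w]
--     if not firm_words:
--         return None
--
--     text_lower = text.lower()
--     word_positions = []
--     for word in firm_words:
--         positions = []
--         start = 0
--         while True:
--             pos = text_lower.find(word, start)
--             if pos == -1:
--                 break
--             positions.append(pos)
--             start = pos + 1
--         if not positions:
--             return None
--         word_positions.append(positions)
--
--     for first_pos in word_positions[0]:
--         candidate = _attempt(first_pos, firm_words, word_positions[1:], text)
--         if candidate is not None: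
--             return candidate
--     return None
--
--
-- def _bisect_right(a, x):
--     lo, hi = 0, len(a)
--     while lo < hi:
--         mid = (lo + hi) // 2
--         if x < a[mid]:
--             hi = mid
--         else:
--             lo = mid + 1
--     return lo
--
--
-- def _boundary(ch):
--     return ch.isalnum() or ch in '&., '
--
--
-- def _attempt(first_pos, firm_words, rest_positions, text):
--     # positions lists are ascending, so the first admissible next position is
--     # the first one strictly greater than cur: locate it by binary search
--     cur = first_pos
--     for plist in rest_positions:
--         i = _bisect_right(plist, cur)
--         if i == len(plist) or plist[i] - cur >= 75:
--             return None
--         cur = plist[i]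
--
--     start_pos = first_pos
--     end_pos = cur + len(firm_words[-1])
--     k = 0
--     for ch in reversed(text[:start_pos]):
--         if not _boundary(ch):
--             break
--         k += 1
--     start_pos -= k
--     m = 0
--     for ch in text[end_pos:]:
--         if not _boundary(ch):
--             break
--         m += 1
--     end_pos += m
--
--     company_name = text[start_pos:end_pos].strip()
--     if all(word in company_name.lower() for word in firm_words):
--         return company_name.strip(' ,():;')
--     return None
-- ===== Notes on version B (the rewrite author's own statement) =====
-- stated objective: alternative
-- what changed: B replaces A's char-accumulator tokenizer with a mask-and-split one, A's linear scan over each next word's position list with a hand-written bisect_right binary search (the lists are ascending), and A's while-loop boundary expansion with takewhile-style counts.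
import Mathlib
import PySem

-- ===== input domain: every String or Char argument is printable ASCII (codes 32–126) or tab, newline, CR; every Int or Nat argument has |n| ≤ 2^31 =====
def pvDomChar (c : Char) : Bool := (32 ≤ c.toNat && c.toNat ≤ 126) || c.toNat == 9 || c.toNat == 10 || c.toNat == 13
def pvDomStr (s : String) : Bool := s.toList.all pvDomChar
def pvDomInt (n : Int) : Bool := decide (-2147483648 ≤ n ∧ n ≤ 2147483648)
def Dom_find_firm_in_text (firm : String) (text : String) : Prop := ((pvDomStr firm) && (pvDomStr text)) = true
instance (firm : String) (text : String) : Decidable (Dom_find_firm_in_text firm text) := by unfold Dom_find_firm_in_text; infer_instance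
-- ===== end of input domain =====

-- B rewrites A with a mask-and-split tokenizer, a binary-search step for the next word
-- position, and takewhile-count boundary expansion (objective: alternative; same result).

-- == helpers shared by the two ports (identical Python lines in Source A and Source B) ==

-- char.isalnum() or char in ['&', '.']
def pvKeep (c : Char) : Bool := PySem.Chars.isalnum c || c == '&' || c == '.'

-- ch.isalnum() or ch in '&., '
def pvBdry (c : Char) : Bool := PySem.Chars.isalnum c || c == '&' || c == '.' || c == ',' || c == ' '

-- len(w) > 1 or (len(w) == 1 and w.isalpha()) or '.' in w
def pvGood (w : List Char) : Bool :=
  decide (1 < w.length) || (w.length == 1 && PySem.Chars.strIsalpha w) || PySem.Chars.isIn ['.'] w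

-- the repeated-find loop collecting all positions of `w` in `t` (both Source A and Source B);
-- fuel ≥ t.length + 1 - start always suffices, the start index strictly increases
def pvFindAllFuel (t w : List Char) : Nat → Nat → List Int
  | 0, _ => []
  | fuel + 1, start =>
    let pos := PySem.Chars.findFrom t w (start : Int) none
    if pos = -1 then [] else pos :: pvFindAllFuel t w fuel (pos.toNat + 1)

def pvFindAll (t w : List Char) : List Int := pvFindAllFuel t w (t.length + 1) 0

-- the loop building word_positions, returning None at the first word with no occurrence
def pvBuildPos (t : List Char) : List (List Char) → Option (List (List Int))
  | [] => some []
  | w :: ws =>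
    let ps := pvFindAll t w
    if ps.isEmpty then none
    else match pvBuildPos t ws with
         | none => none
         | some r => some (ps :: r)

-- ===== PORT A =====

-- A's char-by-char tokenizer loop with its (firm_words, current_word) state
def pvStepA (acc : List (List Char) × List Char) (c : Char) : List (List Char) × List Char :=
  if pvKeep c then (acc.1, acc.2 ++ [c])
  else if acc.2.isEmpty then acc else (acc.1 ++ [acc.2], [])

def pvTokA (s : List Char) : List (List Char) :=
  let st := s.foldl pvStepA ([], [])
  if st.2.isEmpty then st.1 else st.1 ++ [st.2]

-- inner scan: first pos with 0 < pos - current_pos < 75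
def pvFirstValid (cur : Int) : List Int → Option Int
  | [] => none
  | p :: ps => if 0 < p - cur ∧ p - cur < 75 then some p else pvFirstValid cur ps

-- the for-loop over word_positions[1:] carrying (current_pos, found_sequence); break → none
def pvChainA (rest : List (List Int)) (cur : Int) (fs : List Int) : Option (List Int) :=
  match rest with
  | [] => some fs
  | ps :: rest' =>
    match pvFirstValid cur ps with
    | none => none
    | some p => pvChainA rest' p (fs ++ [p])

-- while start_pos > 0 and boundary(text[start_pos-1]): start_pos -= 1
-- (start_pos is a nonnegative int, carried as Nat; getD is only read in range)
def pvExpandL (t : List Char) : Nat → Nat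
  | 0 => 0
  | s + 1 => if pvBdry (t.getD s ' ') then pvExpandL t s else s + 1

-- while end_pos < len(text) and boundary(text[end_pos]): end_pos += 1 (fuel = len - e)
def pvExpandRFuel (t : List Char) : Nat → Nat → Nat
  | 0, e => e
  | f + 1, e => if e < t.length ∧ pvBdry (t.getD e ' ') then pvExpandRFuel t f (e + 1) else e

-- for first_pos in word_positions[0]: … (continue → recurse, return → some)
def pvOuterA (t : List Char) (words : List (List Char)) (rest0 : List (List Int)) :
    List Int → Option (List Char)
  | [] => none
  | fp :: more =>
    match pvChainA rest0 fp [fp] with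
    | none => pvOuterA t words rest0 more
    | some fs =>
      if fs.length = words.length then
        -- found_sequence[0] / found_sequence[-1]: fs is nonempty, defaults never read
        let sp0 := (fs.headD 0).toNat
        let ep0 := (fs.getLastD 0).toNat + (words.getLastD []).length
        let sp := pvExpandL t sp0
        let ep := pvExpandRFuel t (t.length - ep0) ep0
        let name := PySem.Chars.strip (PySem.List.slice t (some (sp : Int)) (some (ep : Int)))
        if words.all (fun w => PySem.Chars.isIn w (PySem.Chars.lower name)) then
          some (PySem.Chars.stripChars name [' ', ',', '(', ')', ':', ';'])
        else pvOuterA t words rest0 more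
      else pvOuterA t words rest0 more

def find_firm_in_text (firm : String) (text : String) : Option String :=
  let fl := PySem.Chars.lower firm.toList
  let words := (pvTokA fl).filter pvGood
  if words.isEmpty then none
  else
    let tl := PySem.Chars.lower text.toList
    match pvBuildPos tl words with
    | none => none
    | some wps =>
      if wps.isEmpty || (wps.headD []).isEmpty then none
      else (pvOuterA text.toList words (wps.drop 1) (wps.headD [])).map String.ofList

-- ===== PORT B =====

-- hand-written bisect_right loop (lo, hi), fuel = hi - lo; a[mid] is in range when read
def pvBisectLoop (a : List Int) (x : Int) : Nat → Nat → Nat → Nat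
  | 0, lo, _ => lo
  | f + 1, lo, hi =>
    if lo < hi then
      let mid := (lo + hi) / 2
      if x < a.getD mid 0 then pvBisectLoop a x f lo mid else pvBisectLoop a x f (mid + 1) hi
    else lo

def pvBisectR (a : List Int) (x : Int) : Nat := pvBisectLoop a x a.length 0 a.length

-- for plist in rest_positions: i = bisect; bounds/gap check; cur = plist[i]
def pvChainB (rest : List (List Int)) (cur : Int) : Option Int :=
  match rest with
  | [] => some cur
  | ps :: rest' =>
    let i := pvBisectR ps cur
    if i = ps.length ∨ 75 ≤ ps.getD i 0 - cur then none
    else pvChainB rest' (ps.getD i 0)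

-- for ch in …: if not boundary(ch): break; k += 1
def pvCountWhile (p : Char → Bool) : List Char → Nat
  | [] => 0
  | c :: cs => if p c then pvCountWhile p cs + 1 else 0

def pvAttemptB (t : List Char) (words : List (List Char)) (rest0 : List (List Int))
    (first : Int) : Option (List Char) :=
  match pvChainB rest0 first with
  | none => none
  | some cur =>
    let sp0 := first.toNat
    let ep0 := cur.toNat + (words.getLastD []).length
    let sp := sp0 - pvCountWhile pvBdry ((t.take sp0).reverse)
    let ep := ep0 + pvCountWhile pvBdry (t.drop ep0)
    let name := PySem.Chars.strip (PySem.List.slice t (some (sp : Int)) (some (ep : Int)))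
    if words.all (fun w => PySem.Chars.isIn w (PySem.Chars.lower name)) then
      some (PySem.Chars.stripChars name [' ', ',', '(', ')', ':', ';'])
    else none

def pvOuterB (t : List Char) (words : List (List Char)) (rest0 : List (List Int)) :
    List Int → Option (List Char)
  | [] => none
  | fp :: more =>
    match pvAttemptB t words rest0 fp with
    | some r => some r
    | none => pvOuterB t words rest0 more

def find_firm_in_text_alt (firm : String) (text : String) : Option String :=
  let fl := PySem.Chars.lower firm.toList
  let masked := fl.map (fun c => if pvKeep c then c else ' ')
  let words := (PySem.Chars.split₀ masked).filter pvGood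
  if words.isEmpty then none
  else
    let tl := PySem.Chars.lower text.toList
    match pvBuildPos tl words with
    | none => none
    | some wps =>
      (pvOuterB text.toList words (wps.drop 1) (wps.headD [])).map String.ofList

-- ===== PRECONDITION & SPEC =====
def Spec_find_firm_in_text (firm : String) (text : String) (out : Option String) : Prop := out = find_firm_in_text_alt firm text
instance (firm : String) (text : String) (out : Option String) : Decidable (Spec_find_firm_in_text firm text out) := by unfold Spec_find_firm_in_text; infer_instance

-- ===== CLAIM (what is proved, stated in full; the proofs are below) =====
def Claim_equal_find_firm_in_text : Prop := ∀ (firm : String) (text : String), Dom_find_firm_in_text firm text → Spec_find_firm_in_text firm text (find_firm_in_text firm text)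

-- ===== LEMMAS AND PROOFS =====

-- kept characters are never whitespace
theorem pvKeep_not_space {c : Char} (h : pvKeep c = true) : PySem.Chars.isspace c = false := by
  unfold pvKeep at h
  have hv : c.val.toNat = c.toNat := rfl
  simp [PySem.Chars.isalnum, PySem.Chars.isalpha, PySem.Chars.isdigit,
    PySem.Chars.isupper, PySem.Chars.islower, Char.le_def, Char.ext_iff, UInt32.le_iff_toNat_le] at h
  have hn : (97 ≤ c.toNat ∧ c.toNat ≤ 122) ∨ (65 ≤ c.toNat ∧ c.toNat ≤ 90) ∨
      (48 ≤ c.toNat ∧ c.toNat ≤ 57) ∨ c.toNat = 38 ∨ c.toNat = 46 := by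
    rcases h with (h|h)|h
    · omega
    · right; right; right; left; rw [← hv, h]; rfl
    · right; right; right; right; rw [← hv, h]; rfl
  simp only [PySem.Chars.isspace]
  simp
  omega

-- A's tokenizer fold = split of the masked string (generalised over the go state)
theorem tok_go (cs : List Char) (ws : List (List Char)) (cur : List Char) :
    PySem.Chars.split₀.go (cs.map (fun c => if pvKeep c then c else ' ')) cur.reverse ws.reverse
      = (let st := cs.foldl pvStepA (ws, cur);
         if st.2.isEmpty then st.1 else st.1 ++ [st.2]) := by
  induction cs generalizing ws cur with
  | nil =>
    simp only [List.map_nil, List.foldl_nil, PySem.Chars.split₀.go]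
    by_cases h : cur.isEmpty <;> simp [h] at *
  | cons c cs ih =>
    simp only [List.map_cons, List.foldl_cons]
    by_cases hk : pvKeep c = true
    · have hs := pvKeep_not_space hk
      simp only [hk, if_pos]
      rw [PySem.Chars.split₀.go, hs]
      simp only [Bool.false_eq_true, if_false]
      have : c :: cur.reverse = (cur ++ [c]).reverse := by simp
      rw [this, ih ws (cur ++ [c])]
      simp [pvStepA, hk]
    · simp only [hk]
      simp only [Bool.false_eq_true, if_false]
      rw [PySem.Chars.split₀.go]
      have hsp : PySem.Chars.isspace ' ' = true := by decide
      rw [hsp]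
      simp only [if_pos]
      by_cases hc : cur.isEmpty
      · have hc' : cur = [] := List.isEmpty_iff.mp hc
        subst hc'
        simp only [List.reverse_nil, List.isEmpty_nil, if_pos]
        have := ih ws []
        simp only [List.reverse_nil] at this
        rw [this]
        simp [pvStepA, hk]
      · simp only [List.isEmpty_reverse, hc]
        simp only [Bool.false_eq_true, if_false]
        rw [show cur.reverse.reverse :: ws.reverse = (ws ++ [cur]).reverse by simp]
        have := ih (ws ++ [cur]) []
        simp only [List.reverse_nil] at this
        rw [this]
        simp [pvStepA, hk, hc]

theorem tok_eq (cs : List Char) :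
    PySem.Chars.split₀ (cs.map (fun c => if pvKeep c then c else ' ')) = pvTokA cs := by
  have := tok_go cs [] []
  simpa [PySem.Chars.split₀, pvTokA] using this

theorem pvGood_ne_nil {w : List Char} (h : pvGood w = true) : w ≠ [] := by
  intro hw; subst hw; revert h; decide

-- the find-all loop produces ascending positions, each one a start of an occurrence
theorem pvFindAllFuel_props (t w : List Char) (hw : w ≠ []) :
    ∀ fuel start, start ≤ t.length →
      List.Pairwise (fun a b => a ≤ b) (pvFindAllFuel t w fuel start) ∧
      ∀ p ∈ pvFindAllFuel t w fuel start, (start : Int) ≤ p ∧ p.toNat + w.length ≤ t.length := by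
  intro fuel
  induction fuel with
  | zero => intro start _; simp [pvFindAllFuel]
  | succ f ih =>
    intro start hstart
    by_cases hpos : PySem.Chars.findFrom t w (start : Int) none = -1
    · simp [pvFindAllFuel, hpos]
    · obtain ⟨hge, hpre, _⟩ := PySem.Chars.findFrom_natCast_spec t w start hstart hpos
      set pos := PySem.Chars.findFrom t w (start : Int) none with hposdef
      have hpos0 : (0 : Int) ≤ pos := le_trans (by exact_mod_cast Nat.zero_le start) hge
      have hlen : w.length ≤ t.length - pos.toNat := by
        have := List.IsPrefix.length_le hpre
        simpa using this
      have hwpos : 0 < w.length := List.length_pos_iff.mpr hw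
      have hlt : pos.toNat < t.length := by omega
      have hstart' : pos.toNat + 1 ≤ t.length := hlt
      obtain ⟨hpw, hmem⟩ := ih (pos.toNat + 1) hstart'
      constructor
      · simp only [pvFindAllFuel, ← hposdef, hpos, if_false]
        refine List.pairwise_cons.mpr ⟨?_, hpw⟩
        intro q hq
        have := (hmem q hq).1
        have : ((pos.toNat + 1 : Nat) : Int) ≤ q := this
        omega
      · intro p hp
        simp only [pvFindAllFuel, ← hposdef, hpos, if_false] at hp
        rcases List.mem_cons.mp hp with h | h
        · subst h; exact ⟨hge, by omega⟩
        · obtain ⟨h1, h2⟩ := hmem p h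
          exact ⟨by push_cast at h1 ⊢; omega, h2⟩

theorem pvFindAll_sorted (t w : List Char) (hw : w ≠ []) :
    List.Pairwise (fun a b => a ≤ b) (pvFindAll t w) := by
  exact (pvFindAllFuel_props t w hw (t.length + 1) 0 (Nat.zero_le _)).1

-- binary-search invariant
theorem pvBisectLoop_spec (a : List Int) (x : Int)
    (hs : List.Pairwise (fun p q => p ≤ q) a) :
    ∀ f lo hi, hi ≤ a.length → lo ≤ hi → hi - lo ≤ f →
      (∀ j, j < lo → j < a.length → a.getD j 0 ≤ x) →
      (∀ j, hi ≤ j → j < a.length → x < a.getD j 0) →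
      lo ≤ pvBisectLoop a x f lo hi ∧ pvBisectLoop a x f lo hi ≤ hi ∧
      (∀ j, j < pvBisectLoop a x f lo hi → j < a.length → a.getD j 0 ≤ x) ∧
      (∀ j, pvBisectLoop a x f lo hi ≤ j → j < a.length → x < a.getD j 0) := by
  have hmono : ∀ i j, i ≤ j → j < a.length → a.getD i 0 ≤ a.getD j 0 := by
    intro i j hij hj
    rcases Nat.eq_or_lt_of_le hij with h | h
    · subst h; exact le_refl _
    · have hi : i < a.length := lt_trans h hj
      rw [List.getD_eq_getElem a 0 hi, List.getD_eq_getElem a 0 hj]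
      exact List.pairwise_iff_getElem.mp hs i j hi hj h
  intro f
  induction f with
  | zero =>
    intro lo hi hhi hlohi hfuel hlow hhigh
    have : lo = hi := by omega
    subst this
    simp only [pvBisectLoop]
    exact ⟨le_refl _, le_refl _, hlow, hhigh⟩
  | succ f ih =>
    intro lo hi hhi hlohi hfuel hlow hhigh
    by_cases hlt : lo < hi
    · have hmid1 : lo ≤ (lo + hi) / 2 := by omega
      have hmid2 : (lo + hi) / 2 < hi := by omega
      by_cases hx : x < a.getD ((lo + hi) / 2) 0
      · have hrec := ih lo ((lo + hi) / 2) (by omega) hmid1 (by omega) hlow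
          (fun j hj hjl => lt_of_lt_of_le hx (hmono _ _ hj hjl))
        simp only [pvBisectLoop, if_pos hlt, if_pos hx]
        exact ⟨hrec.1, le_trans hrec.2.1 (le_of_lt hmid2), hrec.2.2⟩
      · push_neg at hx
        have hrec := ih ((lo + hi) / 2 + 1) hi hhi (by omega) (by omega)
          (fun j hj hjl => le_trans (hmono j ((lo + hi) / 2) (by omega) (by omega)) hx) hhigh
        simp only [pvBisectLoop, if_pos hlt, if_neg (not_lt.mpr hx)]
        exact ⟨le_trans (by omega) hrec.1, hrec.2.1, hrec.2.2⟩
    · simp only [pvBisectLoop, if_neg hlt]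
      have : lo = hi := by omega
      exact ⟨le_refl _, le_of_eq this, hlow, fun j hj hjl => hhigh j (by omega) hjl⟩

theorem pvBisectR_spec (a : List Int) (x : Int)
    (hs : List.Pairwise (fun p q => p ≤ q) a) :
    pvBisectR a x ≤ a.length ∧
    (∀ j, j < pvBisectR a x → j < a.length → a.getD j 0 ≤ x) ∧
    (∀ j, pvBisectR a x ≤ j → j < a.length → x < a.getD j 0) := by
  have h := pvBisectLoop_spec a x hs a.length 0 a.length (le_refl _) (Nat.zero_le _)
    (le_refl _) (by omega) (by omega)
  exact ⟨h.2.1, h.2.2.1, h.2.2.2⟩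

theorem pvFirstValid_none (cur : Int) (ps : List Int)
    (h : ∀ p ∈ ps, ¬(0 < p - cur ∧ p - cur < 75)) : pvFirstValid cur ps = none := by
  induction ps with
  | nil => rfl
  | cons p ps ih =>
    simp only [pvFirstValid, if_neg (h p List.mem_cons_self)]
    exact ih fun q hq => h q (List.mem_cons_of_mem _ hq)

theorem pvFirstValid_some (cur : Int) : ∀ (ps : List Int) (r : Nat) (hr : r < ps.length),
    (∀ j (hj : j < ps.length), j < r → ¬(0 < ps[j] - cur ∧ ps[j] - cur < 75)) →
    (0 < ps[r] - cur ∧ ps[r] - cur < 75) → pvFirstValid cur ps = some ps[r] := by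
  intro ps
  induction ps with
  | nil => intro r hr; simp at hr
  | cons p ps ih =>
    intro r hr hfail hok
    match r with
    | 0 =>
      simp only [pvFirstValid]
      rw [if_pos (by simpa using hok)]
      simp
    | Nat.succ r' =>
      have hhead : ¬(0 < p - cur ∧ p - cur < 75) := by
        have := hfail 0 (by simp) (Nat.succ_pos r')
        simpa using this
      simp only [pvFirstValid, if_neg hhead]
      have hr' : r' < ps.length := by simpa using hr
      have := ih r' hr' (fun j hj hjr => by
        have := hfail (j + 1) (by simpa using Nat.succ_lt_succ hj) (Nat.succ_lt_succ hjr)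
        simpa using this) (by simpa using hok)
      simpa using this

-- A's linear scan = B's bisect step, on an ascending position list
theorem step_eq (ps : List Int) (cur : Int) (hs : List.Pairwise (fun p q => p ≤ q) ps) :
    pvFirstValid cur ps =
      (if pvBisectR ps cur = ps.length ∨ 75 ≤ ps.getD (pvBisectR ps cur) 0 - cur then none
       else some (ps.getD (pvBisectR ps cur) 0)) := by
  obtain ⟨hle, hlow, hhigh⟩ := pvBisectR_spec ps cur hs
  set r := pvBisectR ps cur with hrdef
  have hmono : ∀ i j, i ≤ j → j < ps.length → ps.getD i 0 ≤ ps.getD j 0 := by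
    intro i j hij hj
    rcases Nat.eq_or_lt_of_le hij with h | h
    · subst h; exact le_refl _
    · have hi : i < ps.length := lt_trans h hj
      rw [List.getD_eq_getElem ps 0 hi, List.getD_eq_getElem ps 0 hj]
      exact List.pairwise_iff_getElem.mp hs i j hi hj h
  by_cases hr : r = ps.length
  · rw [if_pos (Or.inl hr)]
    apply pvFirstValid_none
    intro p hp
    obtain ⟨j, hj, hpj⟩ := List.mem_iff_getElem.mp hp
    have := hlow j (by omega) hj
    rw [List.getD_eq_getElem ps 0 hj] at this
    omega
  · have hrlt : r < ps.length := lt_of_le_of_ne hle hr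
    by_cases hgap : 75 ≤ ps.getD r 0 - cur
    · rw [if_pos (Or.inr hgap)]
      apply pvFirstValid_none
      intro p hp
      obtain ⟨j, hj, hpj⟩ := List.mem_iff_getElem.mp hp
      by_cases hjr : j < r
      · have := hlow j hjr hj
        rw [List.getD_eq_getElem ps 0 hj] at this
        omega
      · have h1 := hhigh j (by omega) hj
        have h2 := hmono r j (by omega) hj
        rw [List.getD_eq_getElem ps 0 hj] at h1 h2
        omega
    · rw [if_neg (by push_neg; exact ⟨hr, by omega⟩)]
      have hok : 0 < ps[r] - cur ∧ ps[r] - cur < 75 := by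
        have h1 := hhigh r (le_refl _) hrlt
        rw [List.getD_eq_getElem ps 0 hrlt] at h1 hgap
        omega
      rw [pvFirstValid_some cur ps r hrlt (fun j hj hjr => by
        have := hlow j hjr hj
        rw [List.getD_eq_getElem ps 0 hj] at this
        omega) hok]
      rw [List.getD_eq_getElem ps 0 hrlt]

-- the two chain loops agree (A's carries the whole sequence, B only the last position)
theorem chain_eq : ∀ (rest : List (List Int)) (cur : Int) (fs : List Int),
    (∀ ps ∈ rest, List.Pairwise (fun p q => p ≤ q) ps) → fs ≠ [] → fs.getLastD 0 = cur →
    (pvChainB rest cur = none → pvChainA rest cur fs = none) ∧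
    (∀ c, pvChainB rest cur = some c → ∃ l, pvChainA rest cur fs = some l ∧
        l.headD 0 = fs.headD 0 ∧ l.getLastD 0 = c ∧ l.length = fs.length + rest.length) := by
  intro rest
  induction rest with
  | nil =>
    intro cur fs _ hfs hlast
    refine ⟨by intro h; simp [pvChainB] at h, ?_⟩
    intro c hc
    simp only [pvChainB, Option.some.injEq] at hc
    exact ⟨fs, rfl, rfl, by rw [hlast, hc], by simp⟩
  | cons ps rest' ih =>
    intro cur fs hsort hfs hlast
    have hps : List.Pairwise (fun p q => p ≤ q) ps := hsort ps List.mem_cons_self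
    have hfv := step_eq ps cur hps
    by_cases hcond : pvBisectR ps cur = ps.length ∨ 75 ≤ ps.getD (pvBisectR ps cur) 0 - cur
    · rw [if_pos hcond] at hfv
      refine ⟨fun _ => ?_, fun c hc => ?_⟩
      · simp only [pvChainA, hfv]
      · exfalso
        simp only [pvChainB, if_pos hcond] at hc
        simp at hc
    · rw [if_neg hcond] at hfv
      set p := ps.getD (pvBisectR ps cur) 0 with hpdef
      have hih := ih p (fs ++ [p]) (fun q hq => hsort q (List.mem_cons_of_mem _ hq))
        (by simp) (by simp)
      have hchA : pvChainA (ps :: rest') cur fs = pvChainA rest' p (fs ++ [p]) := by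
        simp only [pvChainA, hfv]
      have hchB : pvChainB (ps :: rest') cur = pvChainB rest' p := by
        simp only [pvChainB]
        rw [← hpdef, if_neg hcond]
      refine ⟨fun h => ?_, fun c hc => ?_⟩
      · rw [hchA]; exact hih.1 (by rw [← hchB]; exact h)
      · obtain ⟨l, hl, hh, hlst, hlen⟩ := hih.2 c (by rw [← hchB]; exact hc)
        refine ⟨l, by rw [hchA]; exact hl, ?_, hlst, ?_⟩
        · rw [hh]
          cases fs with
          | nil => exact absurd rfl hfs
          | cons a t => simp
        · rw [hlen]; simp [List.length_append]; omega

theorem pvCountWhile_le (p : Char → Bool) : ∀ l : List Char, pvCountWhile p l ≤ l.length := by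
  intro l
  induction l with
  | nil => simp [pvCountWhile]
  | cons c cs ih =>
    simp only [pvCountWhile, List.length_cons]
    by_cases h : p c <;> simp [h] <;> omega


-- the left while-loop = count of boundary chars at the end of the prefix
theorem expandL_eq (t : List Char) : ∀ s, s ≤ t.length →
    pvExpandL t s = s - pvCountWhile pvBdry ((t.take s).reverse) := by
  intro s
  induction s with
  | zero => simp [pvExpandL, pvCountWhile]
  | succ s ih =>
    intro hs
    have hlt : s < t.length := hs
    have htake : (t.take (s + 1)).reverse = t[s] :: (t.take s).reverse := by
      rw [List.take_succ]
      simp [List.getElem?_eq_getElem hlt]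
    have hgd : t.getD s ' ' = t[s] := List.getD_eq_getElem t ' ' hlt
    simp only [pvExpandL, htake, pvCountWhile, hgd]
    by_cases hb : pvBdry t[s]
    · rw [if_pos hb, if_pos hb, ih (le_of_lt hlt)]
      have h1 := pvCountWhile_le pvBdry ((t.take s).reverse)
      have h2 : ((t.take s).reverse).length = s := by simp [List.length_take, Nat.min_eq_left (le_of_lt hlt)]
      omega
    · rw [if_neg hb, if_neg hb]; omega

-- the right while-loop = count of boundary chars at the start of the suffix
theorem expandR_eq (t : List Char) : ∀ fuel e, t.length - e ≤ fuel →
    pvExpandRFuel t fuel e = e + pvCountWhile pvBdry (t.drop e) := by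
  intro fuel
  induction fuel with
  | zero =>
    intro e he
    have : t.drop e = [] := List.drop_eq_nil_of_le (by omega)
    simp [pvExpandRFuel, this, pvCountWhile]
  | succ f ih =>
    intro e he
    by_cases hlt : e < t.length
    · have hdrop : t.drop e = t[e] :: t.drop (e + 1) := List.drop_eq_getElem_cons hlt
      have hgd : t.getD e ' ' = t[e] := List.getD_eq_getElem t ' ' hlt
      by_cases hb : pvBdry t[e]
      · have : pvExpandRFuel t (f + 1) e = pvExpandRFuel t f (e + 1) := by
          simp only [pvExpandRFuel, hgd]
          rw [if_pos ⟨hlt, hb⟩]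
        rw [this, ih (e + 1) (by omega), hdrop]
        simp only [pvCountWhile, if_pos hb]
        omega
      · have : pvExpandRFuel t (f + 1) e = e := by
          simp only [pvExpandRFuel, hgd]
          rw [if_neg (by tauto)]
        rw [this, hdrop]
        simp only [pvCountWhile, if_neg hb]
        omega
    · have hdrop : t.drop e = [] := List.drop_eq_nil_of_le (by omega)
      have : pvExpandRFuel t (f + 1) e = e := by
        simp only [pvExpandRFuel]
        rw [if_neg (by intro h; exact absurd h.1 hlt)]
      rw [this, hdrop]
      simp [pvCountWhile]

theorem buildPos_eq (t : List Char) : ∀ (ws : List (List Char)) (wps : List (List Int)),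
    pvBuildPos t ws = some wps → wps = ws.map (pvFindAll t) := by
  intro ws
  induction ws with
  | nil => intro wps h; simp only [pvBuildPos, Option.some.injEq] at h; simp [← h]
  | cons w ws ih =>
    intro wps h
    simp only [pvBuildPos] at h
    by_cases he : (pvFindAll t w).isEmpty
    · rw [if_pos he] at h; exact absurd h (by simp)
    · rw [if_neg he] at h
      cases hb : pvBuildPos t ws with
      | none => rw [hb] at h; exact absurd h (by simp)
      | some r =>
        rw [hb] at h
        simp only [Option.some.injEq] at h
        rw [← h, List.map_cons, ih r hb]

-- the outer loops agree element by element
theorem outer_eq (t : List Char) (words : List (List Char)) (rest0 : List (List Int))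
    (hw : words ≠ []) (hr : rest0.length = words.length - 1)
    (hs : ∀ ps ∈ rest0, List.Pairwise (fun p q => p ≤ q) ps) :
    ∀ l, (∀ p ∈ l, 0 ≤ p ∧ p.toNat ≤ t.length) →
      pvOuterA t words rest0 l = pvOuterB t words rest0 l := by
  intro l
  induction l with
  | nil => intro _; rfl
  | cons fp more ih =>
    intro hl0
    have hfp := hl0 fp List.mem_cons_self
    have hch := chain_eq rest0 fp [fp] hs (by simp) (by simp)
    cases hB : pvChainB rest0 fp with
    | none =>
      have hA := hch.1 hB
      simp only [pvOuterA, pvOuterB, pvAttemptB, hA, hB]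
      exact ih (fun p hp => hl0 p (List.mem_cons_of_mem _ hp))
    | some c =>
      obtain ⟨l', hl', hh, hlst, hlen⟩ := hch.2 c hB
      have hwl : 0 < words.length := List.length_pos_iff.mpr hw
      have hlen' : l'.length = words.length := by
        simp only [List.length_cons, List.length_nil] at hlen
        omega
      have hh' : l'.headD 0 = fp := by simpa using hh
      simp only [pvOuterA, pvOuterB, pvAttemptB, hl', hB]
      rw [if_pos hlen', hh', hlst]
      rw [expandL_eq t fp.toNat hfp.2]
      rw [expandR_eq t (t.length - (c.toNat + (words.getLastD []).length))
        (c.toNat + (words.getLastD []).length) (by omega)]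
      by_cases hall : words.all (fun w => PySem.Chars.isIn w (PySem.Chars.lower
        (PySem.Chars.strip (PySem.List.slice t
          (some ((fp.toNat - pvCountWhile pvBdry ((t.take fp.toNat).reverse) : Nat) : Int))
          (some ((c.toNat + (words.getLastD []).length + pvCountWhile pvBdry
            (t.drop (c.toNat + (words.getLastD []).length)) : Nat) : Int))))))
      · rw [if_pos hall, if_pos hall]
      · rw [if_neg hall, if_neg hall]
        exact ih (fun p hp => hl0 p (List.mem_cons_of_mem _ hp))

-- ===== VERDICT (by name: the statement is the Claim_ definition above) =====
theorem find_firm_in_text_spec : Claim_equal_find_firm_in_text := by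
  unfold Claim_equal_find_firm_in_text Spec_find_firm_in_text
  intro firm text _
  unfold find_firm_in_text find_firm_in_text_alt
  dsimp only
  rw [tok_eq]
  set fl := PySem.Chars.lower firm.toList with hfl
  set words := (pvTokA fl).filter pvGood with hwords
  cases hempty : words.isEmpty with
  | true => simp
  | false =>
    simp only [Bool.false_eq_true, if_false]
    set tl := PySem.Chars.lower text.toList with htl
    cases hbp : pvBuildPos tl words with
    | none => rfl
    | some wps =>
      have hw : words ≠ [] := by
        intro h; rw [h] at hempty; simp at hempty
      have hmap := buildPos_eq tl words wps hbp
      have htlen : tl.length = text.toList.length := by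
        rw [htl]; simp [PySem.Chars.lower]
      -- the dead guard in A is never taken
      obtain ⟨w0, ws', hws⟩ := List.exists_cons_of_ne_nil hw
      have hw0good : pvGood w0 = true := by
        have : w0 ∈ words := by rw [hws]; exact List.mem_cons_self
        exact (List.mem_filter.mp (by rw [hwords] at this; exact this)).2
      have hw0 : w0 ≠ [] := pvGood_ne_nil hw0good
      have hhead : wps.headD [] = pvFindAll tl w0 := by
        rw [hmap, hws]; rfl
      have hne : ¬(pvFindAll tl w0).isEmpty := by
        rw [hws] at hbp
        simp only [pvBuildPos] at hbp
        by_cases h : (pvFindAll tl w0).isEmpty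
        · rw [if_pos h] at hbp; exact absurd hbp (by simp)
        · exact h
      have hguard : (wps.isEmpty || (wps.headD []).isEmpty) = false := by
        rw [hhead]
        have : wps.isEmpty = false := by
          rw [hmap, hws]; rfl
        rw [this]
        simpa using hne
      dsimp only
      rw [hguard]
      simp only [Bool.false_eq_true, if_false]
      congr 1
      apply outer_eq text.toList words (wps.drop 1) hw
      · rw [hmap]; simp
      · intro ps hps
        obtain ⟨w, hwmem, hpw⟩ := List.mem_map.mp (by rw [hmap] at hps; exact List.mem_of_mem_drop hps)
        have hwg : pvGood w = true := (List.mem_filter.mp (by rw [hwords] at hwmem; exact hwmem)).2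
        rw [← hpw]
        exact pvFindAll_sorted tl w (pvGood_ne_nil hwg)
      · intro p hp
        rw [hhead] at hp
        have := (pvFindAllFuel_props tl w0 hw0 (tl.length + 1) 0 (Nat.zero_le _)).2 p hp
        have hw0len : 0 < w0.length := List.length_pos_iff.mpr hw0
        refine ⟨by exact_mod_cast this.1, by omega⟩
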